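-- pv_equiv track=rewrite | github.com/MohamedElashri/bu2lambdapKK | ana/branch_inspector.py | find_common_and_unique_branches
-- ===== SOURCE A (Python) =====
-- from typing import Dict, Set
--
-- def find_common_and_unique_branches(
--                                    data_branches: Dict[str, Set[str]],
--                                    mc_branches: Dict[str, Dict[str, Set[str]]]) -> Dict:
--     """
--     Identify:
--     - Branches common to ALL files (data + all MC)
--     - Branches only in data
--     - Branches only in MC (e.g., truth-matching)
--     - Branches that differ between MC samples
--     """
--     # Flatten MC structure
--     all_mc_branches = set()
--     for particle in mc_branches:
--         for year_mag in mc_branches[particle]: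
--             all_mc_branches.update(mc_branches[particle][year_mag])
--
--     # Flatten data structure
--     all_data_branches = set()
--     for year_mag in data_branches:
--         all_data_branches.update(data_branches[year_mag])
--
--     common = all_data_branches & all_mc_branches
--     data_only = all_data_branches - all_mc_branches
--     mc_only = all_mc_branches - all_data_branches
--
--     return {
--         "common": sorted(common),
--         "data_only": sorted(data_only),
--         "mc_only": sorted(mc_only)
--     }
-- ===== SOURCE B (Python) =====
-- def find_common_and_unique_branches(data_branches, mc_branches):
--     # Presence table: branch name -> (seen_in_data, seen_in_mc); one pass over the
--     # table then partitions the names into the three buckets (no set algebra).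
--     presence = {}
--     for year_dict in mc_branches.values():
--         for branch_set in year_dict.values():
--             for name in branch_set:
--                 presence[name] = (presence.get(name, (False, False))[0], True)
--     for branch_set in data_branches.values():
--         for name in branch_set:
--             presence[name] = (True, presence.get(name, (False, False))[1])
--     common, data_only, mc_only = [], [], []
--     for name, (in_data, in_mc) in presence.items():
--         if in_data and in_mc:
--             common.append(name)
--         elif in_data:
--             data_only.append(name)
--         else:
--             mc_only.append(name)
--     return {
--         "common": sorted(common),
--         "data_only": sorted(data_only),
--         "mc_only": sorted(mc_only)
--     }
-- ===== Notes on version B (the rewrite author's own statement) =====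
-- stated objective: alternative
-- what changed: B replaces the two flattened sets and the set intersection/difference algebra by a single presence table mapping each branch name to (seen_in_data, seen_in_mc) flags, then classifies every name into its bucket in one pass over the table.
import Mathlib
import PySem

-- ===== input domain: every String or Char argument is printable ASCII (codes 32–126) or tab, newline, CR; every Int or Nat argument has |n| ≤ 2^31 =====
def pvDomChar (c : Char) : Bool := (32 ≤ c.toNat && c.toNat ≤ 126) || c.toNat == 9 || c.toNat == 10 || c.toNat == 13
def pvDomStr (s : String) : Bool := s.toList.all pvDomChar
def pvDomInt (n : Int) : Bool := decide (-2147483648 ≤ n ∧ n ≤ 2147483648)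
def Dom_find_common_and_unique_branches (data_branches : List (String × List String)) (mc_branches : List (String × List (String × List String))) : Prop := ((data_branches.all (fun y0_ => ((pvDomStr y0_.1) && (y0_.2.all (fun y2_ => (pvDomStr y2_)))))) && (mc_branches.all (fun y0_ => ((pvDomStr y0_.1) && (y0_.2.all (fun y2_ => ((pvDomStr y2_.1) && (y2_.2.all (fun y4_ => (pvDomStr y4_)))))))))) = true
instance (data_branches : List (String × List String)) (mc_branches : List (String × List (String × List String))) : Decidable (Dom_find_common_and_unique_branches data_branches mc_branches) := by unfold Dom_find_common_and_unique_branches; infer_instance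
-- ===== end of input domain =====

-- B replaces A's two flattened sets and set algebra by one presence table (branch name -> seen_in_data/seen_in_mc flags) partitioned in a single pass (alternative decomposition, same cost).

-- ===== PORT A =====
-- The Python iterates each dict's keys and indexes back into the same dict; on a Python
-- dict (unique keys) the looked-up value is the pair's own value, so the port folds over the pairs.
def find_common_and_unique_branches (data_branches : List (String × List String)) (mc_branches : List (String × List (String × List String))) : List (String × List String) :=
  let all_mc : PySem.Set String :=
    mc_branches.foldl (fun acc particle =>
      particle.2.foldl (fun acc year_mag => PySem.Set.update acc year_mag.2) acc) PySem.Set.empty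
  let all_data : PySem.Set String :=
    data_branches.foldl (fun acc year_mag => PySem.Set.update acc year_mag.2) PySem.Set.empty
  let common := PySem.Set.inter all_data all_mc
  let data_only := PySem.Set.diff all_data all_mc
  let mc_only := PySem.Set.diff all_mc all_data
  [("common", PySem.List.sorted common (fun x => x) false),
   ("data_only", PySem.List.sorted data_only (fun x => x) false),
   ("mc_only", PySem.List.sorted mc_only (fun x => x) false)]

-- ===== PORT B =====
-- presence[name] = (presence.get(name, (False, False))[0], True)
def pvMarkMC (d : PySem.Dict String (Bool × Bool)) (name : String) : PySem.Dict String (Bool × Bool) :=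
  d.insert name ((d.getD name (false, false)).1, true)

-- presence[name] = (True, presence.get(name, (False, False))[1])
def pvMarkData (d : PySem.Dict String (Bool × Bool)) (name : String) : PySem.Dict String (Bool × Bool) :=
  d.insert name (true, (d.getD name (false, false)).2)

-- the body of Source B's partition loop: if in_data and in_mc / elif in_data / else
def pvPartStep (acc : List String × List String × List String) (it : String × (Bool × Bool)) : List String × List String × List String :=
  if it.2.1 && it.2.2 then (acc.1 ++ [it.1], acc.2.1, acc.2.2)
  else if it.2.1 then (acc.1, acc.2.1 ++ [it.1], acc.2.2)
  else (acc.1, acc.2.1, acc.2.2 ++ [it.1])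

def find_common_and_unique_branches_alt (data_branches : List (String × List String)) (mc_branches : List (String × List (String × List String))) : List (String × List String) :=
  let p1 : PySem.Dict String (Bool × Bool) :=
    mc_branches.foldl (fun d particle =>
      particle.2.foldl (fun d year_mag => year_mag.2.foldl pvMarkMC d) d) PySem.Dict.empty
  let presence : PySem.Dict String (Bool × Bool) :=
    data_branches.foldl (fun d year_mag => year_mag.2.foldl pvMarkData d) p1
  let buckets : List String × List String × List String :=
    presence.items.foldl pvPartStep ([], [], [])
  [("common", PySem.List.sorted buckets.1 (fun x => x) false),
   ("data_only", PySem.List.sorted buckets.2.1 (fun x => x) false),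
   ("mc_only", PySem.List.sorted buckets.2.2 (fun x => x) false)]

-- ===== PRECONDITION & SPEC =====
def Spec_find_common_and_unique_branches (data_branches : List (String × List String)) (mc_branches : List (String × List (String × List String))) (out : List (String × List String)) : Prop := out = find_common_and_unique_branches_alt data_branches mc_branches
instance (data_branches : List (String × List String)) (mc_branches : List (String × List (String × List String))) (out : List (String × List String)) : Decidable (Spec_find_common_and_unique_branches data_branches mc_branches out) := by unfold Spec_find_common_and_unique_branches; infer_instance

-- ===== CLAIM (what is proved, stated in full; the proofs are below) =====
def Claim_equal_find_common_and_unique_branches : Prop := ∀ (data_branches : List (String × List String)) (mc_branches : List (String × List (String × List String))), Dom_find_common_and_unique_branches data_branches mc_branches → Spec_find_common_and_unique_branches data_branches mc_branches (find_common_and_unique_branches data_branches mc_branches)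

-- ===== LEMMAS AND PROOFS =====

-- flatten one level of "fold over pairs, fold over the pair's list"
theorem pvFoldlFlat {γ β κ : Type} (l : List (κ × List β)) (f : γ → β → γ) (init : γ) :
    l.foldl (fun d pr => pr.2.foldl f d) init = (l.flatMap (·.2)).foldl f init := by
  induction l generalizing init with
  | nil => rfl
  | cons x xs ih => simp [List.flatMap_cons, List.foldl_append, ih]

def pvMcFlat (mc_branches : List (String × List (String × List String))) : List String :=
  mc_branches.flatMap (fun pr => pr.2.flatMap (·.2))

def pvDataFlat (data_branches : List (String × List String)) : List String :=
  data_branches.flatMap (·.2)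

theorem pvAllMc_eq (mb : List (String × List (String × List String))) :
    mb.foldl (fun acc particle =>
      particle.2.foldl (fun acc year_mag => PySem.Set.update acc year_mag.2) acc) PySem.Set.empty
    = PySem.Set.ofList (pvMcFlat mb) := by
  calc mb.foldl (fun acc particle =>
        particle.2.foldl (fun acc year_mag => PySem.Set.update acc year_mag.2) acc) PySem.Set.empty
      = (mb.flatMap (·.2)).foldl (fun acc year_mag => PySem.Set.update acc year_mag.2) PySem.Set.empty :=
        pvFoldlFlat mb _ _
    _ = ((mb.flatMap (·.2)).flatMap (·.2)).foldl PySem.Set.add PySem.Set.empty :=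
        pvFoldlFlat (mb.flatMap (·.2)) PySem.Set.add PySem.Set.empty
    _ = (pvMcFlat mb).foldl PySem.Set.add PySem.Set.empty := by
        rw [pvMcFlat, ← List.flatMap_assoc]
    _ = PySem.Set.ofList (pvMcFlat mb) := (PySem.Set.ofList_eq_foldl _).symm

theorem pvAllData_eq (db : List (String × List String)) :
    db.foldl (fun acc year_mag => PySem.Set.update acc year_mag.2) PySem.Set.empty
    = PySem.Set.ofList (pvDataFlat db) := by
  calc db.foldl (fun acc year_mag => PySem.Set.update acc year_mag.2) PySem.Set.empty
      = (db.flatMap (·.2)).foldl PySem.Set.add PySem.Set.empty := pvFoldlFlat db PySem.Set.add _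
    _ = PySem.Set.ofList (pvDataFlat db) := (PySem.Set.ofList_eq_foldl _).symm

theorem pvA_eq (db : List (String × List String)) (mb : List (String × List (String × List String))) :
    find_common_and_unique_branches db mb
    = [("common", PySem.List.sorted (PySem.Set.inter (PySem.Set.ofList (pvDataFlat db)) (PySem.Set.ofList (pvMcFlat mb))) (fun x => x) false),
       ("data_only", PySem.List.sorted (PySem.Set.diff (PySem.Set.ofList (pvDataFlat db)) (PySem.Set.ofList (pvMcFlat mb))) (fun x => x) false),
       ("mc_only", PySem.List.sorted (PySem.Set.diff (PySem.Set.ofList (pvMcFlat mb)) (PySem.Set.ofList (pvDataFlat db))) (fun x => x) false)] := by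
  show [("common", PySem.List.sorted (PySem.Set.inter
          (db.foldl (fun acc year_mag => PySem.Set.update acc year_mag.2) PySem.Set.empty)
          (mb.foldl (fun acc particle => particle.2.foldl (fun acc year_mag => PySem.Set.update acc year_mag.2) acc) PySem.Set.empty)) (fun x => x) false),
        ("data_only", PySem.List.sorted (PySem.Set.diff
          (db.foldl (fun acc year_mag => PySem.Set.update acc year_mag.2) PySem.Set.empty)
          (mb.foldl (fun acc particle => particle.2.foldl (fun acc year_mag => PySem.Set.update acc year_mag.2) acc) PySem.Set.empty)) (fun x => x) false),
        ("mc_only", PySem.List.sorted (PySem.Set.diff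
          (mb.foldl (fun acc particle => particle.2.foldl (fun acc year_mag => PySem.Set.update acc year_mag.2) acc) PySem.Set.empty)
          (db.foldl (fun acc year_mag => PySem.Set.update acc year_mag.2) PySem.Set.empty)) (fun x => x) false)] = _
  rw [pvAllMc_eq, pvAllData_eq]

-- the presence dict of Source B, over the flattened name lists
def pvPresence (db : List (String × List String)) (mb : List (String × List (String × List String))) : PySem.Dict String (Bool × Bool) :=
  (pvDataFlat db).foldl pvMarkData ((pvMcFlat mb).foldl pvMarkMC PySem.Dict.empty)

theorem pvPresence_eq (db : List (String × List String)) (mb : List (String × List (String × List String))) :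
    db.foldl (fun d year_mag => year_mag.2.foldl pvMarkData d)
      (mb.foldl (fun d particle => particle.2.foldl (fun d year_mag => year_mag.2.foldl pvMarkMC d) d) PySem.Dict.empty)
    = pvPresence db mb := by
  unfold pvPresence pvDataFlat
  rw [pvFoldlFlat db pvMarkData]
  congr 1
  calc mb.foldl (fun d particle => particle.2.foldl (fun d year_mag => year_mag.2.foldl pvMarkMC d) d) PySem.Dict.empty
      = (mb.flatMap (·.2)).foldl (fun d year_mag => year_mag.2.foldl pvMarkMC d) PySem.Dict.empty :=
        pvFoldlFlat mb _ _
    _ = ((mb.flatMap (·.2)).flatMap (·.2)).foldl pvMarkMC PySem.Dict.empty :=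
        pvFoldlFlat (mb.flatMap (·.2)) pvMarkMC _
    _ = (pvMcFlat mb).foldl pvMarkMC PySem.Dict.empty := by rw [pvMcFlat, ← List.flatMap_assoc]

theorem pvP1_get? (l : List String) :
    ∀ k, (l.foldl pvMarkMC PySem.Dict.empty).get? k
      = if k ∈ l then some (false, true) else none := by
  induction l using List.reverseRecOn with
  | nil => intro k; simp [PySem.Dict.get?_empty]
  | append_singleton l' x ih =>
    intro k
    rw [List.foldl_append]
    show ((l'.foldl pvMarkMC PySem.Dict.empty).insert x
        (((l'.foldl pvMarkMC PySem.Dict.empty).getD x (false, false)).1, true)).get? k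
      = if k ∈ l' ++ [x] then some (false, true) else none
    have hgd : ((l'.foldl pvMarkMC PySem.Dict.empty).getD x (false, false)).1 = false := by
      rw [PySem.Dict.getD_eq_get?_getD, ih x]
      by_cases hx : x ∈ l' <;> simp [hx]
    rw [hgd, PySem.Dict.get?_insert, ih k]
    by_cases hk : k = x <;> by_cases hl : k ∈ l' <;> simp [hk, hl]

theorem pvP2_get? (l : List String) (d : PySem.Dict String (Bool × Bool)) :
    ∀ k, (l.foldl pvMarkData d).get? k
      = if k ∈ l then some (true, (d.getD k (false, false)).2) else d.get? k := by
  induction l using List.reverseRecOn with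
  | nil => intro k; simp
  | append_singleton l' x ih =>
    intro k
    rw [List.foldl_append]
    show ((l'.foldl pvMarkData d).insert x
        (true, ((l'.foldl pvMarkData d).getD x (false, false)).2)).get? k
      = if k ∈ l' ++ [x] then some (true, (d.getD k (false, false)).2) else d.get? k
    have hgd : ((l'.foldl pvMarkData d).getD x (false, false)).2 = (d.getD x (false, false)).2 := by
      rw [PySem.Dict.getD_eq_get?_getD, ih x]
      by_cases hx : x ∈ l' <;> simp [hx, PySem.Dict.getD_eq_get?_getD]
    rw [hgd, PySem.Dict.get?_insert, ih k]
    by_cases hk : k = x <;> by_cases hl : k ∈ l' <;> simp [hk, hl]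

theorem pvPresence_getD (db : List (String × List String)) (mb : List (String × List (String × List String))) (k : String) :
    (pvPresence db mb).getD k (false, false)
      = (decide (k ∈ pvDataFlat db), decide (k ∈ pvMcFlat mb)) := by
  unfold pvPresence
  rw [PySem.Dict.getD_eq_get?_getD, pvP2_get?]
  have h1 := pvP1_get? (pvMcFlat mb) k
  by_cases hd : k ∈ pvDataFlat db <;> by_cases hm : k ∈ pvMcFlat mb <;>
    simp [hd, hm, PySem.Dict.getD_eq_get?_getD, h1]

theorem pvPresence_keys (db : List (String × List String)) (mb : List (String × List (String × List String))) :
    (pvPresence db mb).keys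
      = PySem.Set.update (PySem.Set.ofList (pvMcFlat mb)) (pvDataFlat db) := by
  unfold pvPresence
  have h1 : ((pvMcFlat mb).foldl pvMarkMC PySem.Dict.empty).keys
      = PySem.Set.ofList (pvMcFlat mb) := by
    rw [show (pvMcFlat mb).foldl pvMarkMC PySem.Dict.empty
        = (pvMcFlat mb).foldl (fun d x => d.insert x ((d.getD x (false, false)).1, true)) PySem.Dict.empty from rfl]
    rw [PySem.Dict.keys_foldl_insert]
    rw [show (PySem.Dict.empty : PySem.Dict String (Bool × Bool)).keys = ([] : List String) from rfl]
    exact PySem.Set.update_nil_left _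
  rw [show (pvDataFlat db).foldl pvMarkData ((pvMcFlat mb).foldl pvMarkMC PySem.Dict.empty)
      = (pvDataFlat db).foldl (fun d x => d.insert x (true, (d.getD x (false, false)).2)) ((pvMcFlat mb).foldl pvMarkMC PySem.Dict.empty) from rfl]
  rw [PySem.Dict.keys_foldl_insert, h1]

theorem pvPresence_keys_nodup (db : List (String × List String)) (mb : List (String × List (String × List String))) :
    (pvPresence db mb).keys.Nodup := by
  rw [pvPresence_keys]
  exact PySem.Set.nodup_update _ _ (PySem.Set.nodup_ofList _)

theorem pvMem_presence_keys (db : List (String × List String)) (mb : List (String × List (String × List String))) (k : String) :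
    k ∈ (pvPresence db mb).keys ↔ k ∈ pvMcFlat mb ∨ k ∈ pvDataFlat db := by
  rw [pvPresence_keys, PySem.Set.mem_update, PySem.Set.mem_ofList]

theorem pvPartition_foldl (l : List (String × (Bool × Bool))) (a b c : List String) :
    l.foldl pvPartStep (a, b, c)
    = (a ++ (l.filter (fun it => it.2.1 && it.2.2)).map (·.1),
       b ++ (l.filter (fun it => it.2.1 && !it.2.2)).map (·.1),
       c ++ (l.filter (fun it => !it.2.1)).map (·.1)) := by
  induction l generalizing a b c with
  | nil => simp
  | cons x xs ih =>
    obtain ⟨n, bd, bm⟩ := x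
    rw [List.foldl_cons]
    cases bd <;> cases bm
    · rw [show pvPartStep (a, b, c) (n, false, false) = (a, b, c ++ [n]) from rfl, ih]
      simp
    · rw [show pvPartStep (a, b, c) (n, false, true) = (a, b, c ++ [n]) from rfl, ih]
      simp
    · rw [show pvPartStep (a, b, c) (n, true, false) = (a, b ++ [n], c) from rfl, ih]
      simp
    · rw [show pvPartStep (a, b, c) (n, true, true) = (a ++ [n], b, c) from rfl, ih]
      simp

theorem pvFilterMapFst {α : Type} (l : List String) (v : String → α) (q : String × α → Bool) :
    ((l.map (fun k => (k, v k))).filter q).map (·.1)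
      = l.filter (fun k => q (k, v k)) := by
  rw [List.filter_map, List.map_map]
  simp [Function.comp_def]

theorem pvB_eq (db : List (String × List String)) (mb : List (String × List (String × List String))) :
    find_common_and_unique_branches_alt db mb
    = [("common", PySem.List.sorted ((pvPresence db mb).keys.filter (fun k => decide (k ∈ pvDataFlat db) && decide (k ∈ pvMcFlat mb))) (fun x => x) false),
       ("data_only", PySem.List.sorted ((pvPresence db mb).keys.filter (fun k => decide (k ∈ pvDataFlat db) && !decide (k ∈ pvMcFlat mb))) (fun x => x) false),
       ("mc_only", PySem.List.sorted ((pvPresence db mb).keys.filter (fun k => !decide (k ∈ pvDataFlat db))) (fun x => x) false)] := by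
  have hp : (db.foldl (fun d year_mag => year_mag.2.foldl pvMarkData d)
      (mb.foldl (fun d particle => particle.2.foldl (fun d year_mag => year_mag.2.foldl pvMarkMC d) d) PySem.Dict.empty)) = pvPresence db mb := pvPresence_eq db mb
  show [("common", PySem.List.sorted ((db.foldl (fun d year_mag => year_mag.2.foldl pvMarkData d)
          (mb.foldl (fun d particle => particle.2.foldl (fun d year_mag => year_mag.2.foldl pvMarkMC d) d) PySem.Dict.empty)).items.foldl pvPartStep ([], [], [])).1 (fun x => x) false),
        ("data_only", PySem.List.sorted ((db.foldl (fun d year_mag => year_mag.2.foldl pvMarkData d)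
          (mb.foldl (fun d particle => particle.2.foldl (fun d year_mag => year_mag.2.foldl pvMarkMC d) d) PySem.Dict.empty)).items.foldl pvPartStep ([], [], [])).2.1 (fun x => x) false),
        ("mc_only", PySem.List.sorted ((db.foldl (fun d year_mag => year_mag.2.foldl pvMarkData d)
          (mb.foldl (fun d particle => particle.2.foldl (fun d year_mag => year_mag.2.foldl pvMarkMC d) d) PySem.Dict.empty)).items.foldl pvPartStep ([], [], [])).2.2 (fun x => x) false)] = _
  rw [hp]
  rw [PySem.Dict.items_eq_map_keys _ (pvPresence_keys_nodup db mb) (false, false)]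
  rw [pvPartition_foldl]
  simp only [List.nil_append, pvFilterMapFst]
  simp only [pvPresence_getD]

-- two lists of distinct names with the same membership have the same ascending sort
theorem pvSortEq (xs ys : List String) (hx : xs.Nodup) (hy : ys.Nodup)
    (hmem : ∀ k, k ∈ xs ↔ k ∈ ys) :
    PySem.List.sorted xs (fun x => x) false = PySem.List.sorted ys (fun x => x) false := by
  rw [PySem.List.sorted_id_eq_sorted_id_iff_perm]
  exact (List.perm_ext_iff_of_nodup hx hy).2 hmem

-- ===== VERDICT (by name: the statement is the Claim_ definition above) =====
theorem find_common_and_unique_branches_spec : Claim_equal_find_common_and_unique_branches := by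
  intro db mb _
  unfold Spec_find_common_and_unique_branches
  rw [pvA_eq, pvB_eq]
  have hnd := pvPresence_keys_nodup db mb
  have hcommon := pvSortEq
      (PySem.Set.inter (PySem.Set.ofList (pvDataFlat db)) (PySem.Set.ofList (pvMcFlat mb)))
      ((pvPresence db mb).keys.filter (fun k => decide (k ∈ pvDataFlat db) && decide (k ∈ pvMcFlat mb)))
      (PySem.Set.nodup_inter _ _ (PySem.Set.nodup_ofList _)) (hnd.filter _)
      (by intro k
          simp only [PySem.Set.mem_inter, PySem.Set.mem_ofList, List.mem_filter, pvMem_presence_keys]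
          by_cases hd : k ∈ pvDataFlat db <;> by_cases hm : k ∈ pvMcFlat mb <;> simp [hd, hm])
  have hdonly := pvSortEq
      (PySem.Set.diff (PySem.Set.ofList (pvDataFlat db)) (PySem.Set.ofList (pvMcFlat mb)))
      ((pvPresence db mb).keys.filter (fun k => decide (k ∈ pvDataFlat db) && !decide (k ∈ pvMcFlat mb)))
      (PySem.Set.nodup_diff _ _ (PySem.Set.nodup_ofList _)) (hnd.filter _)
      (by intro k
          simp only [PySem.Set.mem_diff, PySem.Set.mem_ofList, List.mem_filter, pvMem_presence_keys]
          by_cases hd : k ∈ pvDataFlat db <;> by_cases hm : k ∈ pvMcFlat mb <;> simp [hd, hm])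
  have hmonly := pvSortEq
      (PySem.Set.diff (PySem.Set.ofList (pvMcFlat mb)) (PySem.Set.ofList (pvDataFlat db)))
      ((pvPresence db mb).keys.filter (fun k => !decide (k ∈ pvDataFlat db)))
      (PySem.Set.nodup_diff _ _ (PySem.Set.nodup_ofList _)) (hnd.filter _)
      (by intro k
          simp only [PySem.Set.mem_diff, PySem.Set.mem_ofList, List.mem_filter, pvMem_presence_keys]
          by_cases hd : k ∈ pvDataFlat db <;> by_cases hm : k ∈ pvMcFlat mb <;> simp [hd, hm])
  rw [hcommon, hdonly, hmonly]
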